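-- pv_equiv track=rewrite | github.com/krimeano/euler-py | problem381.py | my_fact2
-- ===== SOURCE A (Python) =====
-- def my_fact2(p):
--     out = 1
--     if p < 10:
--         for x in range(1, p - 4):
--             out = (out * x) % p
--         return out
--     out = 24 % p
--     for x in range(5, (p + 1) // 2):
--         out = (((p - out) * x) % p * x) % p
--     return out
-- ===== SOURCE B (Python) =====
-- def _prod(lo, hi, p):
--     # product of the integers in [lo, hi) modulo p, by balanced range splitting
--     if hi - lo <= 0:
--         return 1
--     if hi - lo == 1:
--         return lo % p
--     mid = (lo + hi) // 2
--     return _prod(lo, mid, p) * _prod(mid, hi, p) % p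
--
--
-- def my_fact2(p):
--     if p <= 5:
--         return 1
--     if p < 10:
--         return _prod(1, p - 4, p)
--     m = (p + 1) // 2
--     s = 24 * _prod(5, m, p) ** 2 % p
--     if (m - 5) % 2 == 0:
--         return s
--     return -s % p
-- ===== Notes on version B (the rewrite author's own statement) =====
-- stated objective: alternative
-- what changed: B replaces A's left-to-right negate-multiply-square scan by a balanced divide-and-conquer modular product of the half range, squared once and signed by the parity of the range length.
import Mathlib
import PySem

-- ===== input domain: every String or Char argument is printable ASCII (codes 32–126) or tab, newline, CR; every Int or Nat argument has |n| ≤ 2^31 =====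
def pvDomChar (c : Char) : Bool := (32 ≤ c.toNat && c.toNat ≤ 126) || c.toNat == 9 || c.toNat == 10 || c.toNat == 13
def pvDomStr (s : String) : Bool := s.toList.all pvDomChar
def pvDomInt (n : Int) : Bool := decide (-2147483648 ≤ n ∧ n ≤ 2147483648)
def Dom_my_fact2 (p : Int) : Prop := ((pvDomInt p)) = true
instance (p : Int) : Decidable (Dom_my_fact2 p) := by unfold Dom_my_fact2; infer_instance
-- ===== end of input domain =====

-- B replaces A's left-to-right negate-multiply-square scan by a balanced
-- divide-and-conquer modular product of the half range, squared once and
-- signed by the parity of the range length (objective: alternative).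

-- ===== PORT A =====
def my_fact2 (p : Int) : Int :=
  if p < 10 then
    (PySem.List.pyRange 1 (p - 4) 1).foldl (fun out x => PySem.Int.mod (out * x) p) 1
  else
    (PySem.List.pyRange 5 (PySem.Int.floordiv (p + 1) 2) 1).foldl
      (fun out x => PySem.Int.mod (PySem.Int.mod ((p - out) * x) p * x) p)
      (PySem.Int.mod 24 p)

-- ===== PORT B =====
-- product of the integers in [lo, hi) modulo p, by balanced range splitting (Source B's _prod)
def pvProd (lo hi p : Int) : Int :=
  if hi - lo ≤ 0 then 1
  else if hi - lo = 1 then PySem.Int.mod lo p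
  else
    PySem.Int.mod
      (pvProd lo (PySem.Int.floordiv (lo + hi) 2) p *
       pvProd (PySem.Int.floordiv (lo + hi) 2) hi p) p
termination_by (hi - lo).toNat
decreasing_by
  all_goals rw [PySem.Int.floordiv_eq_ediv_of_pos (by norm_num : (0:Int) < 2)]; omega

def my_fact2_alt (p : Int) : Int :=
  if p ≤ 5 then 1
  else if p < 10 then pvProd 1 (p - 4) p
  else
    let m := PySem.Int.floordiv (p + 1) 2
    let s := PySem.Int.mod (24 * pvProd 5 m p ^ 2) p
    if PySem.Int.mod (m - 5) 2 = 0 then s else PySem.Int.mod (-s) p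

-- ===== PRECONDITION & SPEC =====
def Spec_my_fact2 (p : Int) (out : Int) : Prop := out = my_fact2_alt p
instance (p : Int) (out : Int) : Decidable (Spec_my_fact2 p out) := by unfold Spec_my_fact2; infer_instance

-- ===== CLAIM (what is proved, stated in full; the proofs are below) =====
def Claim_equal_my_fact2 : Prop := ∀ (p : Int), Dom_my_fact2 p → Spec_my_fact2 p (my_fact2 p)

-- ===== LEMMAS AND PROOFS =====

-- A residue is congruent to the number it reduces
theorem pv_emod_self (p a : Int) : a % p ≡ a [ZMOD p] :=
  Int.emod_emod_of_dvd a dvd_rfl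

-- plain multiply-and-reduce fold computes the reduced product
theorem pv_foldl_modmul (p : Int) (hp : (0:Int) < p) :
    ∀ (l : List Int) (c : Int),
      l.foldl (fun out x => PySem.Int.mod (out * x) p) (c % p) = (c * l.prod) % p := by
  intro l
  induction l with
  | nil => intro c; simp
  | cons x l ih =>
      intro c
      simp only [List.foldl_cons, List.prod_cons, PySem.Int.mod_eq_emod_of_pos hp]
      have h1 : (c % p * x) % p = (c * x) % p :=
        ((pv_emod_self p c).mul_right x :)
      rw [h1]
      have := ih (c * x)
      simp only [PySem.Int.mod_eq_emod_of_pos hp] at this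
      rw [this, mul_assoc]

-- the balanced splitting product equals the reduced range product
theorem pv_pvProd_eq (p : Int) (hp : (0:Int) < p) :
    ∀ (n : Nat) (lo hi : Int), (hi - lo).toNat = n → lo < hi →
      pvProd lo hi p = (PySem.List.pyRange lo hi 1).prod % p := by
  intro n
  induction n using Nat.strong_induction_on with
  | _ n ih =>
      intro lo hi hn hlt
      rw [pvProd]
      by_cases h1 : hi - lo = 1
      · obtain rfl : hi = lo + 1 := by omega
        simp [h1, PySem.List.pyRange_one_singleton, PySem.Int.mod_eq_emod_of_pos hp]
      · have h2 : ¬ hi - lo ≤ 0 := by omega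
        simp only [h2, if_false, h1, if_false]
        have hmid := PySem.Int.floordiv_eq_ediv_of_pos (b := 2) (by norm_num) (a := lo + hi)
        set mid := PySem.Int.floordiv (lo + hi) 2 with hmdef
        have hb1 : lo < mid := by omega
        have hb2 : mid < hi := by omega
        rw [ih (mid - lo).toNat (by omega) lo mid rfl hb1,
            ih (hi - mid).toNat (by omega) mid hi rfl hb2]
        rw [PySem.List.pyRange_one_append lo mid hi (by omega) (by omega), List.prod_append]
        simp only [PySem.Int.mod_eq_emod_of_pos hp]
        exact ((pv_emod_self p _).mul (pv_emod_self p _) :)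

-- A's negate-multiply-square scan computes sign · init · (range product)², reduced
theorem pv_aloop (p : Int) (hp : (0:Int) < p) :
    ∀ (l : List Int) (c : Int),
      l.foldl (fun out x => PySem.Int.mod (PySem.Int.mod ((p - out) * x) p * x) p) (c % p)
        = ((-1) ^ l.length * c * l.prod ^ 2) % p := by
  intro l
  induction l with
  | nil => intro c; simp
  | cons x l ih =>
      intro c
      simp only [List.foldl_cons, List.length_cons, List.prod_cons,
        PySem.Int.mod_eq_emod_of_pos hp]
      have hstep : (p - c % p) * x % p * x % p = (-(c * x * x)) % p := by
        calc (p - c % p) * x % p * x % p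
            = (p - c % p) * x * x % p := ((pv_emod_self p _).mul_right x :)
          _ = (-(c * x * x)) % p := by
              have h0 : p ≡ 0 [ZMOD p] := by unfold Int.ModEq; simp
              have : (p - c % p) * x * x ≡ (0 - c) * x * x [ZMOD p] :=
                ((h0.sub (pv_emod_self p c)).mul_right x).mul_right x
              calc (p - c % p) * x * x % p = (0 - c) * x * x % p := this
                _ = (-(c * x * x)) % p := by ring_nf
      rw [hstep]
      have := ih (-(c * x * x))
      simp only [PySem.Int.mod_eq_emod_of_pos hp] at this
      rw [this]
      congr 1
      ring

-- ===== VERDICT (by name: the statement is the Claim_ definition above) =====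
theorem my_fact2_spec : Claim_equal_my_fact2 := by
  intro p _
  show my_fact2 p = my_fact2_alt p
  unfold my_fact2 my_fact2_alt
  by_cases h5 : p ≤ 5
  · rw [PySem.List.pyRange_one_eq_nil (by omega)]
    simp [show p < 10 by omega, h5]
  · by_cases h10 : p < 10
    · have hp : (0:Int) < p := by omega
      simp only [h10, if_true, h5, if_false]
      have h1 : (1:Int) % p = 1 := Int.emod_eq_of_lt (by norm_num) (by omega)
      have hA := pv_foldl_modmul p hp (PySem.List.pyRange 1 (p - 4) 1) 1
      rw [h1] at hA
      rw [hA, pv_pvProd_eq p hp (p - 4 - 1).toNat 1 (p - 4) rfl (by omega), one_mul]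
    · have hp : (0:Int) < p := by omega
      simp only [h10, if_false, h5, if_false]
      have hmid := PySem.Int.floordiv_eq_ediv_of_pos (b := 2) (by norm_num) (a := p + 1)
      set m := PySem.Int.floordiv (p + 1) 2 with hmdef
      have hm5 : 5 ≤ m := by omega
      have h2 : (0:Int) < 2 := by norm_num
      -- A's side via the loop lemma
      have hA := pv_aloop p hp (PySem.List.pyRange 5 m 1) 24
      rw [show PySem.Int.mod 24 p = (24:Int) % p from PySem.Int.mod_eq_emod_of_pos hp, hA,
        PySem.List.length_pyRange_one]
      -- B's accumulator is congruent to the plain range product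
      set P := (PySem.List.pyRange 5 m 1).prod with hPdef
      have hf : pvProd 5 m p ≡ P [ZMOD p] := by
        by_cases hm : 5 < m
        · rw [pv_pvProd_eq p hp (m - 5).toNat 5 m rfl hm]
          exact pv_emod_self p P
        · have hm' : m = 5 := by omega
          rw [hPdef, hm', pvProd]
          simp [PySem.List.pyRange_one_eq_nil (le_refl (5:Int))]
      have hs : PySem.Int.mod (24 * pvProd 5 m p ^ 2) p = (24 * P ^ 2) % p := by
        rw [PySem.Int.mod_eq_emod_of_pos hp]
        exact ((Int.ModEq.refl 24).mul (hf.pow 2) :)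
      by_cases hpar : PySem.Int.mod (m - 5) 2 = 0
      · simp only [hpar, if_true, hs]
        have hev : Even (m - 5).toNat := by
          rw [PySem.Int.mod_eq_emod_of_pos h2] at hpar
          have : Even (m - 5) := Int.even_iff.mpr hpar
          rw [← Int.even_coe_nat, Int.toNat_of_nonneg (by omega)]
          exact this
        rw [hev.neg_one_pow, one_mul]
      · simp only [hpar, if_false, hs]
        have hod : Odd (m - 5).toNat := by
          rw [PySem.Int.mod_eq_emod_of_pos h2] at hpar
          have : Odd (m - 5) := Int.odd_iff.mpr (by omega)
          rw [← Int.odd_coe_nat, Int.toNat_of_nonneg (by omega)]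
          exact this
        rw [hod.neg_one_pow, PySem.Int.mod_eq_emod_of_pos hp]
        calc (-1) * 24 * P ^ 2 % p = (-(24 * P ^ 2)) % p := by ring_nf
          _ = (-(24 * P ^ 2 % p)) % p := ((pv_emod_self p _).neg).symm
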